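-- pv_equiv track=rewrite | github.com/shreya-g3/group-17 | baseline/dataloader_utils.py | hierarchical_to_bio
-- ===== SOURCE A (Python) =====
-- def hierarchical_to_bio(tags):
--
--     bio = []
--     prev = 0
--
--     for t in tags:
--         t = int(t)  # ensure it's an integer
--         if t == 0:
--             bio.append("O")
--         else:
--             if prev == 0:
--                 bio.append("B")
--             else:
--                 bio.append("I")
--         prev = t
--
--     return bio
-- ===== SOURCE B (Python) =====
-- def hierarchical_to_bio(tags):
--     # Run-oriented traversal: emit "O" for zeros; for each maximal nonzero
--     # run emit "B" then "I" for the rest. No prev-state variable.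
--     bio = []
--     i = 0
--     n = len(tags)
--     while i < n:
--         if int(tags[i]) == 0:
--             bio.append("O")
--             i += 1
--         else:
--             bio.append("B")
--             i += 1
--             while i < n and int(tags[i]) != 0:
--                 bio.append("I")
--                 i += 1
--     return bio
-- ===== Notes on version B (the rewrite author's own statement) =====
-- stated objective: alternative
-- what changed: Replaced the stateful prev-tracking per-element pass with a run-oriented traversal: zeros emit 'O', each maximal nonzero run emits 'B' followed by 'I's, with no previous-tag state variable.
import Mathlib
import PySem

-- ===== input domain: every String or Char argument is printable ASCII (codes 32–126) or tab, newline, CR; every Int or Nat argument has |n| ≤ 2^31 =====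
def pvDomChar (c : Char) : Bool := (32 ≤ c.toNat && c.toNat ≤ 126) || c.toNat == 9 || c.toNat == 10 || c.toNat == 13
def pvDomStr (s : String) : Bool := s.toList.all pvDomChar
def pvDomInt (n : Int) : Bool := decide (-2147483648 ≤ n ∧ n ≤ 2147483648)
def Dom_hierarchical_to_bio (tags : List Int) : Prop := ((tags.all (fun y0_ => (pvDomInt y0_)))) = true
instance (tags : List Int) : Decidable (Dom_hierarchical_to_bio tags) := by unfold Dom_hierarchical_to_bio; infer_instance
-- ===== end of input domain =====

-- B replaces A's prev-state per-element pass with a run-oriented traversal (alternative decomposition, same cost).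

-- ===== PORT A =====
-- A: single pass keeping `prev`; int(t) is identity on Int inputs.
def pvAGo (prev : Int) : List Int → List String
  | [] => []
  | t :: rest =>
      (if t = 0 then "O" else if prev = 0 then "B" else "I") :: pvAGo t rest

def hierarchical_to_bio (tags : List Int) : List String := pvAGo 0 tags

-- ===== PORT B =====
-- B: mutual recursion over runs; pvBRun consumes a nonzero run emitting "I".
mutual
  def pvBGo : List Int → List String
    | [] => []
    | t :: rest => if t = 0 then "O" :: pvBGo rest else "B" :: pvBRun rest
  def pvBRun : List Int → List String
    | [] => []
    | t :: rest => if t = 0 then "O" :: pvBGo rest else "I" :: pvBRun rest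
end

def hierarchical_to_bio_alt (tags : List Int) : List String := pvBGo tags

-- ===== PRECONDITION & SPEC =====
def Spec_hierarchical_to_bio (tags : List Int) (out : List String) : Prop := out = hierarchical_to_bio_alt tags
instance (tags : List Int) (out : List String) : Decidable (Spec_hierarchical_to_bio tags out) := by unfold Spec_hierarchical_to_bio; infer_instance

-- ===== CLAIM (what is proved, stated in full; the proofs are below) =====
def Claim_equal_hierarchical_to_bio : Prop := ∀ (tags : List Int), Dom_hierarchical_to_bio tags → Spec_hierarchical_to_bio tags (hierarchical_to_bio tags)

-- ===== LEMMAS AND PROOFS =====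
theorem pvAGo_eq (tags : List Int) :
    ∀ prev : Int, pvAGo prev tags = if prev = 0 then pvBGo tags else pvBRun tags := by
  induction tags with
  | nil => intro prev; simp [pvAGo, pvBGo, pvBRun]
  | cons t rest ih =>
      intro prev
      by_cases ht : t = 0 <;> by_cases hp : prev = 0 <;>
        simp [pvAGo, pvBGo, pvBRun, ht, hp, ih]

-- ===== VERDICT (by name: the statement is the Claim_ definition above) =====
theorem hierarchical_to_bio_spec : Claim_equal_hierarchical_to_bio := by
  intro tags _
  unfold Spec_hierarchical_to_bio hierarchical_to_bio hierarchical_to_bio_alt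
  simp [pvAGo_eq]
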